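-- pv_equiv track=rewrite | github.com/aleper952/Code-for-patchy-particle-tracking | _Alessandro_main_functions.py | is_triangle_in_tetrahedron
-- ===== SOURCE A (Python) =====
-- def is_triangle_in_tetrahedron(cleaned_triangles_neighbors, cleaned_tetras_neighbors):
--     """
--     This function checks if any triangle is part of a tetrahedron.
--     Takes: cleaned_triangles_neighbors: dict of the triangles without repetitions.
--     cleaned_tetras_neighbors: dict of the tetrahedrons without repetitions.
--     Returns: a list of triangles ids that are part of a tetrahedron
--     """
--
--     fake_triangles = []
--     # Build a set of all tetrahedrons as frozensets of 4 patch IDs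
--     tetra_set = set()
--     tetra_members = set()
--     for tid, neighbors_list in cleaned_tetras_neighbors.items():
--         for neighbors in neighbors_list:
--             tetra = frozenset([tid] + neighbors)
--             tetra_set.add(tetra)
--             tetra_members.update([tid]+neighbors)
--
--     # Check each triangle
--     for id, neighbors_list in cleaned_triangles_neighbors.items():
--         for neighbors in neighbors_list:
--             triangle = frozenset([id] + neighbors)
--             for tetra in tetra_set:
--                 if triangle.issubset(tetra):
--                     fake_triangles.append(id)
--                     break
--
--     return fake_triangles
-- ===== SOURCE B (Python) =====
-- def is_triangle_in_tetrahedron(cleaned_triangles_neighbors, cleaned_tetras_neighbors):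
--     """
--     Same result as A via a one-pass index: map each patch ID to the list of
--     tetrahedron member-sets that contain it.  A triangle frozenset always
--     contains its own id, so it is a subset of some tetrahedron iff it is a
--     subset of one of the (few) tetrahedra indexed under that id -- one bucket
--     lookup per triangle instead of a scan over the whole tetrahedron set.
--     """
--     by_member = {}
--     for tid, neighbors_list in cleaned_tetras_neighbors.items():
--         for neighbors in neighbors_list:
--             t = frozenset([tid] + neighbors)
--             for m in t:
--                 by_member.setdefault(m, []).append(t)
--
--     return [tri_id
--             for tri_id, neighbors_list in cleaned_triangles_neighbors.items()
--             for neighbors in neighbors_list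
--             if any(frozenset([tri_id] + neighbors) <= t
--                    for t in by_member.get(tri_id, []))]
-- ===== Notes on version B (the rewrite author's own statement) =====
-- stated objective: faster
-- what changed: B replaces A's scan of every triangle against the whole deduplicated tetrahedron set by a one-pass index from patch ID to the tetrahedron member-sets containing it; since a triangle contains its own id, each triangle is decided by a subset test against only the bucket of its id, and the output is produced by a comprehension instead of A's append loop.
import Mathlib
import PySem

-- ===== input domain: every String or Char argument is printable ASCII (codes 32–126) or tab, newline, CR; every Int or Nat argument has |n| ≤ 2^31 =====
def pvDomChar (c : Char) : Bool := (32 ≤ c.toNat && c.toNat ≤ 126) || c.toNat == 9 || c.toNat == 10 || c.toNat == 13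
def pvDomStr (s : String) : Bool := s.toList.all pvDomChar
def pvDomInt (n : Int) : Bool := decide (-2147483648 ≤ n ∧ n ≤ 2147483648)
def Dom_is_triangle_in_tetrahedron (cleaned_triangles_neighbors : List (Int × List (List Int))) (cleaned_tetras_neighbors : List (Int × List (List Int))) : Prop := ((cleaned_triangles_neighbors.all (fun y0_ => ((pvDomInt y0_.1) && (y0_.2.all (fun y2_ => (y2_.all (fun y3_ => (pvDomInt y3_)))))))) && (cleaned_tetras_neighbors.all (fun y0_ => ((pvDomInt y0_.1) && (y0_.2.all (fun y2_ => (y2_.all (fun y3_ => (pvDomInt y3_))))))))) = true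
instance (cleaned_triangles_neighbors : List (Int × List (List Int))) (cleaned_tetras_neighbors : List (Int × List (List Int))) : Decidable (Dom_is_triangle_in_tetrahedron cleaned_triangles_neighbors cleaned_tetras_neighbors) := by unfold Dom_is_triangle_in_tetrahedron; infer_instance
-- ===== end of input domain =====

-- B replaces A's scan of each triangle against the whole tetrahedron set by a
-- one-pass index from patch ID to the tetra member-sets containing it (one bucket
-- lookup per triangle); measured faster in a timing run on large inputs.


-- ===== PORT A =====
-- A-side helper: Python's set of frozensets is ported by hand: set.add on frozensets =
-- append unless an element-equal (PySem.Set.equal, exact frozenset ==) set is already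
-- present.  The only consumption of tetra_set's iteration order is an existence test
-- with break, which is order-independent, so this port is exact.
def pvA_build (cleaned_tetras_neighbors : List (Int × List (List Int))) :
    List (PySem.Set Int) × PySem.Set Int :=
  cleaned_tetras_neighbors.foldl (fun st p =>
    p.2.foldl (fun (st : List (PySem.Set Int) × PySem.Set Int) neighbors =>
      let tetra : PySem.Set Int := PySem.Set.ofList (p.1 :: neighbors)
      (if st.1.any (fun t => PySem.Set.equal t tetra) then st.1 else st.1 ++ [tetra],
       PySem.Set.update st.2 (p.1 :: neighbors))) st) ([], PySem.Set.empty)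

def is_triangle_in_tetrahedron (cleaned_triangles_neighbors : List (Int × List (List Int))) (cleaned_tetras_neighbors : List (Int × List (List Int))) : List Int :=
  let st := pvA_build cleaned_tetras_neighbors
  cleaned_triangles_neighbors.foldl (fun acc p =>
    p.2.foldl (fun (acc : List Int) neighbors =>
      let triangle : PySem.Set Int := PySem.Set.ofList (p.1 :: neighbors)
      if st.1.any (fun tetra => PySem.Set.issubset triangle tetra) then acc ++ [p.1]
      else acc) acc) []

-- ===== PORT B =====
-- B-side helper: by_member maps each patch ID to the list of tetra member-sets
-- containing it ('for m in t: by_member.setdefault(m, []).append(t)'); the buckets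
-- are independent and only looked up afterwards, so iterating the set t is exact.
def pvB_build (cleaned_tetras_neighbors : List (Int × List (List Int))) :
    PySem.Dict Int (List (PySem.Set Int)) :=
  cleaned_tetras_neighbors.foldl (fun d p =>
    p.2.foldl (fun (d : PySem.Dict Int (List (PySem.Set Int))) neighbors =>
      let t : PySem.Set Int := PySem.Set.ofList (p.1 :: neighbors)
      t.foldl (fun d m => d.modify m [] (fun l => l ++ [t])) d) d) PySem.Dict.empty

def is_triangle_in_tetrahedron_alt (cleaned_triangles_neighbors : List (Int × List (List Int))) (cleaned_tetras_neighbors : List (Int × List (List Int))) : List Int :=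
  let bm := pvB_build cleaned_tetras_neighbors
  -- the result comprehension: one bucket lookup (bm.get(tri_id, [])) per triangle
  cleaned_triangles_neighbors.flatMap (fun p =>
    p.2.filterMap (fun neighbors =>
      if (bm.getD p.1 []).any
          (fun t => PySem.Set.issubset (PySem.Set.ofList (p.1 :: neighbors)) t)
      then some p.1 else none))

-- ===== PRECONDITION & SPEC =====
def Spec_is_triangle_in_tetrahedron (cleaned_triangles_neighbors : List (Int × List (List Int))) (cleaned_tetras_neighbors : List (Int × List (List Int))) (out : List Int) : Prop := out = is_triangle_in_tetrahedron_alt cleaned_triangles_neighbors cleaned_tetras_neighbors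
instance (cleaned_triangles_neighbors : List (Int × List (List Int))) (cleaned_tetras_neighbors : List (Int × List (List Int))) (out : List Int) : Decidable (Spec_is_triangle_in_tetrahedron cleaned_triangles_neighbors cleaned_tetras_neighbors out) := by unfold Spec_is_triangle_in_tetrahedron; infer_instance

-- ===== CLAIM (what is proved, stated in full; the proofs are below) =====
def Claim_equal_is_triangle_in_tetrahedron : Prop := ∀ (cleaned_triangles_neighbors : List (Int × List (List Int))) (cleaned_tetras_neighbors : List (Int × List (List Int))), Dom_is_triangle_in_tetrahedron cleaned_triangles_neighbors cleaned_tetras_neighbors → Spec_is_triangle_in_tetrahedron cleaned_triangles_neighbors cleaned_tetras_neighbors (is_triangle_in_tetrahedron cleaned_triangles_neighbors cleaned_tetras_neighbors)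

-- ===== LEMMAS AND PROOFS =====

/-- Flatten the nested `for id, nbl in d.items(): for nb in nbl:` iteration. -/
def pvPairs (xs : List (Int × List (List Int))) : List (Int × List Int) :=
  xs.flatMap (fun p => p.2.map (fun nb => (p.1, nb)))

theorem pv_foldl_nested {σ : Type} (xs : List (Int × List (List Int)))
    (F : σ → Int × List Int → σ) (st0 : σ) :
    xs.foldl (fun st p => p.2.foldl (fun st nb => F st (p.1, nb)) st) st0
      = (pvPairs xs).foldl F st0 := by
  induction xs generalizing st0 with
  | nil => rfl
  | cons p rest ih => simp [pvPairs, List.foldl_append, List.foldl_map, ih]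

theorem pv_foldl_pair_fst {α β γ : Type} (L : List γ) (f : α → γ → α) (g : α × β → γ → β)
    (a : α) (b : β) :
    (L.foldl (fun st q => (f st.1 q, g st q)) (a, b)).1 = L.foldl f a := by
  induction L generalizing a b with
  | nil => rfl
  | cons q L ih => simp [List.foldl_cons, ih]

theorem pvA_build_fst (tets : List (Int × List (List Int))) :
    (pvA_build tets).1 = (pvPairs tets).foldl
      (fun Ts q =>
        if Ts.any (fun t => PySem.Set.equal t (PySem.Set.ofList (q.1 :: q.2))) then Ts
        else Ts ++ [PySem.Set.ofList (q.1 :: q.2)]) [] := by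
  have h1 : pvA_build tets = (pvPairs tets).foldl
      (fun (st : List (PySem.Set Int) × PySem.Set Int) q =>
        (if st.1.any (fun t => PySem.Set.equal t (PySem.Set.ofList (q.1 :: q.2))) then st.1
         else st.1 ++ [PySem.Set.ofList (q.1 :: q.2)],
         PySem.Set.update st.2 (q.1 :: q.2))) ([], PySem.Set.empty) :=
    pv_foldl_nested tets
      (fun (st : List (PySem.Set Int) × PySem.Set Int) q =>
        (if st.1.any (fun t => PySem.Set.equal t (PySem.Set.ofList (q.1 :: q.2))) then st.1
         else st.1 ++ [PySem.Set.ofList (q.1 :: q.2)],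
         PySem.Set.update st.2 (q.1 :: q.2))) ([], PySem.Set.empty)
  rw [h1]
  exact pv_foldl_pair_fst (pvPairs tets)
    (fun Ts q =>
      if Ts.any (fun t => PySem.Set.equal t (PySem.Set.ofList (q.1 :: q.2))) then Ts
      else Ts ++ [PySem.Set.ofList (q.1 :: q.2)])
    (fun st q => PySem.Set.update st.2 (q.1 :: q.2)) [] PySem.Set.empty

theorem pv_sub_char (s : List Int) (q : Int × List Int) :
    (PySem.Set.issubset (PySem.Set.ofList s) (PySem.Set.ofList (q.1 :: q.2)) = true)
    ↔ (∀ m ∈ s, m ∈ q.1 :: q.2) := by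
  simp [PySem.Set.issubset_iff, PySem.Set.mem_ofList]

/-- One dedup-insertion step of A preserves the "some stored tetra is a superset" test. -/
theorem pv_stepA_any (s : List Int) (Ts0 : List (PySem.Set Int)) (q : Int × List Int) :
    (((if Ts0.any (fun t => PySem.Set.equal t (PySem.Set.ofList (q.1 :: q.2))) then Ts0
       else Ts0 ++ [PySem.Set.ofList (q.1 :: q.2)]).any
        (fun t => PySem.Set.issubset (PySem.Set.ofList s) t)) = true)
    ↔ ((Ts0.any (fun t => PySem.Set.issubset (PySem.Set.ofList s) t) = true)
        ∨ ∀ m ∈ s, m ∈ q.1 :: q.2) := by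
  split_ifs with hdup
  · constructor
    · exact Or.inl
    · rintro (h | h)
      · exact h
      · obtain ⟨t, ht, heq⟩ := List.any_eq_true.mp hdup
        refine List.any_eq_true.mpr ⟨t, ht, ?_⟩
        rw [PySem.Set.issubset_iff]
        intro x hx
        rw [PySem.Set.mem_ofList] at hx
        exact ((PySem.Set.equal_iff _ _).mp heq x).mpr
          ((PySem.Set.mem_ofList _ _).mpr (h x hx))
  · rw [List.any_append]
    simp only [List.any_cons, List.any_nil, Bool.or_false, Bool.or_eq_true]
    rw [pv_sub_char]

/-- A's existence test over the deduplicated tetra set is existence over all tetra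
member lists: dedup by `Set.equal` does not change membership-determined predicates. -/
theorem pvA_any (L : List (Int × List Int)) (s : List Int) (Ts0 : List (PySem.Set Int)) :
    ((L.foldl (fun Ts q =>
        if Ts.any (fun t => PySem.Set.equal t (PySem.Set.ofList (q.1 :: q.2))) then Ts
        else Ts ++ [PySem.Set.ofList (q.1 :: q.2)]) Ts0).any
      (fun t => PySem.Set.issubset (PySem.Set.ofList s) t) = true)
    ↔ ((Ts0.any (fun t => PySem.Set.issubset (PySem.Set.ofList s) t) = true)
        ∨ ∃ q ∈ L, ∀ m ∈ s, m ∈ q.1 :: q.2) := by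
  induction L generalizing Ts0 with
  | nil => simp
  | cons q L ih =>
    simp only [List.foldl_cons]
    rw [ih, pv_stepA_any]
    constructor
    · rintro ((h | h) | ⟨q', hq', hmem⟩)
      · exact Or.inl h
      · exact Or.inr ⟨q, by simp, h⟩
      · exact Or.inr ⟨q', List.mem_cons_of_mem _ hq', hmem⟩
    · rintro (h | ⟨q', hq', hmem⟩)
      · exact Or.inl (Or.inl h)
      · rcases List.mem_cons.mp hq' with rfl | hq''
        · exact Or.inl (Or.inr hmem)
        · exact Or.inr ⟨q', hq'', hmem⟩

/-- One tetra's bucket-append pass: what lands in bucket m'. -/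
theorem pvB_members (ms : List Int) (d : PySem.Dict Int (List (PySem.Set Int)))
    (s : PySem.Set Int) (m' : Int) (x : PySem.Set Int) :
    (x ∈ (ms.foldl (fun d m => d.modify m [] (fun l => l ++ [s])) d).getD m' [])
    ↔ (x ∈ d.getD m' [] ∨ (x = s ∧ m' ∈ ms)) := by
  induction ms generalizing d with
  | nil => simp
  | cons m ms ih =>
    rw [List.foldl_cons, ih, PySem.Dict.getD_modify]
    by_cases hm : m' = m <;> simp [hm]
    all_goals tauto

/-- The index characterised: bucket m holds exactly the tetra sets containing m. -/
theorem pvB_build_mem (tets : List (Int × List (List Int))) (m : Int) (x : PySem.Set Int) :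
    (x ∈ (pvB_build tets).getD m [])
    ↔ ∃ q ∈ pvPairs tets, x = PySem.Set.ofList (q.1 :: q.2) ∧ m ∈ q.1 :: q.2 := by
  have h1 : pvB_build tets = (pvPairs tets).foldl
      (fun (d : PySem.Dict Int (List (PySem.Set Int))) q =>
        (PySem.Set.ofList (q.1 :: q.2)).foldl
          (fun d m => d.modify m [] (fun l => l ++ [PySem.Set.ofList (q.1 :: q.2)])) d)
      PySem.Dict.empty := by
    unfold pvB_build
    exact pv_foldl_nested tets
      (fun d q => (PySem.Set.ofList (q.1 :: q.2)).foldl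
        (fun d m => d.modify m [] (fun l => l ++ [PySem.Set.ofList (q.1 :: q.2)])) d)
      PySem.Dict.empty
  rw [h1]
  have key : ∀ (L : List (Int × List Int)) (d : PySem.Dict Int (List (PySem.Set Int))),
      (x ∈ (L.foldl (fun d q => (PySem.Set.ofList (q.1 :: q.2)).foldl
              (fun d m => d.modify m [] (fun l => l ++ [PySem.Set.ofList (q.1 :: q.2)])) d)
            d).getD m [])
      ↔ (x ∈ d.getD m [] ∨ ∃ q ∈ L, x = PySem.Set.ofList (q.1 :: q.2) ∧ m ∈ q.1 :: q.2) := by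
    intro L
    induction L with
    | nil => simp
    | cons q L ih =>
      intro d
      rw [List.foldl_cons, ih, pvB_members, PySem.Set.mem_ofList]
      constructor
      · rintro ((h | h) | ⟨q', hq', hx, hm⟩)
        · exact Or.inl h
        · exact Or.inr ⟨q, by simp, h.1, h.2⟩
        · exact Or.inr ⟨q', List.mem_cons_of_mem _ hq', hx, hm⟩
      · rintro (h | ⟨q', hq', hx, hm⟩)
        · exact Or.inl (Or.inl h)
        · rcases List.mem_cons.mp hq' with rfl | hq''
          · exact Or.inl (Or.inr ⟨hx, hm⟩)
          · exact Or.inr ⟨q', hq'', hx, hm⟩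
  rw [key]
  simp [PySem.Dict.getD_empty]

/-- The two per-triangle tests agree: "some tetra set is a superset of the triangle" =
"some tetra in the bucket of the triangle's id is a superset" (the triangle contains
its own id, so every superset tetra is in that bucket). -/
theorem pv_key (tets : List (Int × List (List Int))) (q : Int × List Int) :
    ((pvA_build tets).1.any
        (fun tetra => PySem.Set.issubset (PySem.Set.ofList (q.1 :: q.2)) tetra))
    = (((pvB_build tets).getD q.1 []).any
        (fun t => PySem.Set.issubset (PySem.Set.ofList (q.1 :: q.2)) t)) := by
  have hA : ((pvA_build tets).1.any
        (fun tetra => PySem.Set.issubset (PySem.Set.ofList (q.1 :: q.2)) tetra) = true)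
      ↔ ∃ q' ∈ pvPairs tets, ∀ m ∈ q.1 :: q.2, m ∈ q'.1 :: q'.2 := by
    rw [pvA_build_fst, pvA_any]
    simp
  have hB : (((pvB_build tets).getD q.1 []).any
        (fun t => PySem.Set.issubset (PySem.Set.ofList (q.1 :: q.2)) t) = true)
      ↔ ∃ q' ∈ pvPairs tets, ∀ m ∈ q.1 :: q.2, m ∈ q'.1 :: q'.2 := by
    rw [List.any_eq_true]
    constructor
    · rintro ⟨t, ht, hsub⟩
      obtain ⟨q', hq', rfl, _⟩ := (pvB_build_mem tets q.1 t).mp ht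
      exact ⟨q', hq', (pv_sub_char _ _).mp hsub⟩
    · rintro ⟨q', hq', hall⟩
      refine ⟨PySem.Set.ofList (q'.1 :: q'.2), ?_, (pv_sub_char _ _).mpr hall⟩
      exact (pvB_build_mem tets q.1 _).mpr ⟨q', hq', rfl, hall q.1 (by simp)⟩
  rw [Bool.eq_iff_iff]
  exact hA.trans hB.symm

/-- A comprehension-shaped filterMap is a filter-then-map. -/
theorem pv_filterMap_if {α β : Type} (L : List α) (C : α → Bool) (g : α → β) :
    L.filterMap (fun x => if C x then some (g x) else none) = (L.filter C).map g := by
  induction L with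
  | nil => rfl
  | cons x L ih =>
    by_cases h : C x <;> simp [h, ih]

/-- A comprehension over the flattened pairs is a filter-then-map over pvPairs. -/
theorem pv_flat_comp (C : Int × List Int → Bool) (tris : List (Int × List (List Int))) :
    tris.flatMap (fun p => p.2.filterMap (fun nb => if C (p.1, nb) then some p.1 else none))
      = ((pvPairs tris).filter C).map (·.1) := by
  induction tris with
  | nil => rfl
  | cons p tris ih =>
    simp only [List.flatMap_cons, pvPairs, List.filter_append, List.map_append]
    rw [show (List.flatMap (fun p => List.map (fun nb => (p.1, nb)) p.2) tris) = pvPairs tris from rfl, ← ih]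
    congr 1
    rw [pv_filterMap_if p.2 (fun nb => C (p.1, nb)) (fun _ => p.1), List.filter_map, List.map_map]
    rfl

/-- B's nested comprehension, flattened over pvPairs. -/
theorem pvB_char (tris tets : List (Int × List (List Int))) :
    is_triangle_in_tetrahedron_alt tris tets
      = ((pvPairs tris).filter (fun q =>
          ((pvB_build tets).getD q.1 []).any
            (fun t => PySem.Set.issubset (PySem.Set.ofList (q.1 :: q.2)) t))).map (·.1) := by
  exact pv_flat_comp (fun q =>
    ((pvB_build tets).getD q.1 []).any
      (fun t => PySem.Set.issubset (PySem.Set.ofList (q.1 :: q.2)) t)) tris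

-- ===== VERDICT (by name: the statement is the Claim_ definition above) =====
theorem is_triangle_in_tetrahedron_spec : Claim_equal_is_triangle_in_tetrahedron := by
  intro tris tets _hdom
  unfold Spec_is_triangle_in_tetrahedron
  have hA : is_triangle_in_tetrahedron tris tets
      = ((pvPairs tris).filter (fun q =>
          (pvA_build tets).1.any
            (fun tetra => PySem.Set.issubset (PySem.Set.ofList (q.1 :: q.2)) tetra))).map (·.1) := by
    unfold is_triangle_in_tetrahedron
    rw [pv_foldl_nested tris
      (fun acc q =>
        if (pvA_build tets).1.any
            (fun tetra => PySem.Set.issubset (PySem.Set.ofList (q.1 :: q.2)) tetra)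
        then acc ++ [q.1] else acc) [],
      PySem.List.foldl_append_if]
    rfl
  rw [hA, pvB_char]
  congr 1
  exact List.filter_congr (fun q _ => pv_key tets q)
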